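-- pv_equiv track=rewrite | github.com/kulkarniadithya/CPTAM | code/hanlp_resources.py | remove_quotes_comma
-- ===== SOURCE A (Python) =====
-- def remove_quotes_comma(hanlp_parsed_sentence):
--     hanlp_characters = [char for char in hanlp_parsed_sentence]
--
--     change = 1
--     index = 0
--     while change > 0:
--         change = 0
--         for i in range(index, len(hanlp_characters)):
--             if hanlp_characters[i] == "\'":
--                 hanlp_characters.pop(i)
--                 change = 1
--                 index = i
--                 break
--
--     change = 1
--     index = 0
--     while change > 0:
--         change = 0
--         for i in range(index, len(hanlp_characters)-1):
--             if (hanlp_characters[i] == ",") and (hanlp_characters[i+1] == " "):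
--                 hanlp_characters.pop(i)
--                 change = 1
--                 index = i
--                 break
--
--     return ''.join(hanlp_characters)
-- ===== SOURCE B (Python) =====
-- def remove_quotes_comma(hanlp_parsed_sentence):
--     s = ''.join(hanlp_parsed_sentence)
--     return s.replace("'", "").replace(", ", " ")
-- ===== Notes on version B (the rewrite author's own statement) =====
-- stated objective: faster
-- what changed: Replaced the two restart-on-pop scan-and-remove while loops over a mutable char list by two linear string substitutions: join the input, strip every single quote with one replace call, then replace each comma-followed-by-space pair with a space; non-overlapping left-to-right replace matches A's pop-and-resume behaviour exactly, including on runs of consecutive commas.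
import Mathlib
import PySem

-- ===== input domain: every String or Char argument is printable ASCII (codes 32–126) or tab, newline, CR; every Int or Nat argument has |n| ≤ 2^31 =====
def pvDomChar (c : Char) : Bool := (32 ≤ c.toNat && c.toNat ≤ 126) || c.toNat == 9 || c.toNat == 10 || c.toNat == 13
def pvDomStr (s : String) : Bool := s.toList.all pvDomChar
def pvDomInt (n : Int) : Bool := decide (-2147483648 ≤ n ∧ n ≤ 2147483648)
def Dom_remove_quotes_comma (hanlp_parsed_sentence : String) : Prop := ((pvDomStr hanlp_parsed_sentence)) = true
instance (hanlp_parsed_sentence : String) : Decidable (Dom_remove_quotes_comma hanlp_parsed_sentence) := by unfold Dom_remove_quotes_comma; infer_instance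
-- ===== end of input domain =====

-- B replaces A's two restart-on-pop scan-and-remove loops over a mutable char list
-- by two string substitutions (drop every "'", then replace each ", " by " ").

-- ===== PORT A =====
-- inner `for i in range(index, len(chars))` of the first while loop: first i ≥ index with chars[i] = "'"
def pvScanQuote (chars : List Char) (i : Nat) : Option Nat :=
  if h : i < chars.length then
    if chars[i] = '\'' then some i else pvScanQuote chars (i + 1)
  else none
termination_by chars.length - i

-- first `while change > 0` loop: pop the found quote, set index = i, rescan; the fuel only
-- bounds the number of pops (≤ length), it never cuts the Python loop short
def pvLoop1 (fuel : Nat) (chars : List Char) (index : Nat) : List Char :=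
  match fuel with
  | 0 => chars
  | fuel + 1 =>
    match pvScanQuote chars index with
    | none => chars
    | some i => pvLoop1 fuel (chars.eraseIdx i) i

-- inner `for i in range(index, len(chars)-1)` of the second while loop
def pvScanComma (chars : List Char) (i : Nat) : Option Nat :=
  if h : i + 1 < chars.length then
    if chars[i]'(by omega) = ',' ∧ chars[i + 1] = ' ' then some i else pvScanComma chars (i + 1)
  else none
termination_by chars.length - i

-- second `while change > 0` loop
def pvLoop2 (fuel : Nat) (chars : List Char) (index : Nat) : List Char :=
  match fuel with
  | 0 => chars
  | fuel + 1 =>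
    match pvScanComma chars index with
    | none => chars
    | some i => pvLoop2 fuel (chars.eraseIdx i) i

-- `[char for char in s]`, the two while loops, `''.join(chars)` (= String.ofList on the char list)
def remove_quotes_comma (hanlp_parsed_sentence : String) : String :=
  let cs := hanlp_parsed_sentence.toList
  let cs1 := pvLoop1 cs.length cs 0
  let cs2 := pvLoop2 cs1.length cs1 0
  String.ofList cs2

-- ===== PORT B =====
-- ''.join(s) on a string is s itself; then the two replace calls, in order
def remove_quotes_comma_alt (hanlp_parsed_sentence : String) : String :=
  PySem.Str.replace (PySem.Str.replace hanlp_parsed_sentence "'" "") ", " " "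

-- ===== PRECONDITION & SPEC =====
def Spec_remove_quotes_comma (hanlp_parsed_sentence : String) (out : String) : Prop := out = remove_quotes_comma_alt hanlp_parsed_sentence
instance (hanlp_parsed_sentence : String) (out : String) : Decidable (Spec_remove_quotes_comma hanlp_parsed_sentence out) := by unfold Spec_remove_quotes_comma; infer_instance

-- ===== CLAIM (what is proved, stated in full; the proofs are below) =====
def Claim_equal_remove_quotes_comma : Prop := ∀ (hanlp_parsed_sentence : String), Dom_remove_quotes_comma hanlp_parsed_sentence → Spec_remove_quotes_comma hanlp_parsed_sentence (remove_quotes_comma hanlp_parsed_sentence)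

-- ===== LEMMAS AND PROOFS =====

-- one-pass specification of the ", " → " " substitution
def pvRep : List Char → List Char
  | [] => []
  | [c] => [c]
  | c :: d :: t =>
    if c = ',' ∧ d = ' ' then ' ' :: pvRep t else c :: pvRep (d :: t)

-- the "no ', ' adjacency" relation
def pvP (a b : Char) : Prop := ¬(a = ',' ∧ b = ' ')

lemma pvRep_cons (c : Char) (l : List Char) (h : ∀ b ∈ l.head?, pvP c b) :
    pvRep (c :: l) = c :: pvRep l := by
  cases l with
  | nil => simp [pvRep]
  | cons d t =>
    have hcd : ¬(c = ',' ∧ d = ' ') := h d rfl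
    simp [pvRep, hcd]

lemma pvRep_append (m l : List Char) (hm : m.IsChain pvP)
    (hl : ∀ b ∈ l.head?, b ≠ ' ') : pvRep (m ++ l) = m ++ pvRep l := by
  induction m with
  | nil => simp
  | cons c m' ih =>
    have hrest : pvRep (m' ++ l) = m' ++ pvRep l := ih (List.isChain_cons.mp hm).2
    have hhead : ∀ b ∈ (m' ++ l).head?, pvP c b := by
      intro b hb
      cases m' with
      | nil =>
        simp only [List.nil_append] at hb
        have hb' := hl b hb
        intro hc; exact hb' hc.2
      | cons d t =>
        simp only [List.cons_append, List.head?_cons, Option.mem_def, Option.some.injEq] at hb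
        have hcd := (List.isChain_cons.mp hm).1 d rfl
        rw [← hb]; exact hcd
    calc pvRep (c :: m' ++ l) = c :: pvRep (m' ++ l) := pvRep_cons c (m' ++ l) hhead
      _ = c :: (m' ++ pvRep l) := by rw [hrest]
      _ = (c :: m') ++ pvRep l := rfl

lemma pvRep_eq_self (m : List Char) (hm : m.IsChain pvP) : pvRep m = m := by
  have h := pvRep_append m [] hm (by simp)
  simpa [pvRep] using h

-- ---- scan specs ----

lemma pvScanQuote_none (chars : List Char) (i : Nat) :
    pvScanQuote chars i = none →
    ∀ j, i ≤ j → (hj : j < chars.length) → chars[j] ≠ '\'' := by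
  fun_induction pvScanQuote chars i with
  | case1 i hi hq => intro h; simp at h
  | case2 i hi hq ih =>
    intro h j hij hj
    rcases Nat.eq_or_lt_of_le hij with rfl | hlt
    · simpa using hq
    · exact ih h j hlt hj
  | case3 i hi =>
    intro h j hij hj
    omega

lemma pvScanQuote_some (chars : List Char) (i k : Nat) :
    pvScanQuote chars i = some k →
    i ≤ k ∧ ∃ hk : k < chars.length, chars[k] = '\'' ∧
      ∀ j, i ≤ j → j < k → (hj : j < chars.length) → chars[j] ≠ '\'' := by
  fun_induction pvScanQuote chars i with
  | case1 i hi hq =>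
    intro h
    obtain rfl : i = k := by simpa using h
    exact ⟨le_refl _, hi, hq, fun j h1 h2 _ => by omega⟩
  | case2 i hi hq ih =>
    intro h
    obtain ⟨hik, hk, hck, hmin⟩ := ih h
    refine ⟨by omega, hk, hck, ?_⟩
    intro j h1 h2 hj
    rcases Nat.eq_or_lt_of_le h1 with rfl | hlt
    · simpa using hq
    · exact hmin j hlt h2 hj
  | case3 i hi => intro h; simp at h

lemma pvScanComma_none (chars : List Char) (i : Nat) :
    pvScanComma chars i = none →
    ∀ j, i ≤ j → (hj : j + 1 < chars.length) →
      ¬(chars[j]'(by omega) = ',' ∧ chars[j + 1] = ' ') := by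
  fun_induction pvScanComma chars i with
  | case1 i hi hq => intro h; simp at h
  | case2 i hi hq ih =>
    intro h j hij hj
    rcases Nat.eq_or_lt_of_le hij with rfl | hlt
    · exact hq
    · exact ih h j hlt hj
  | case3 i hi =>
    intro h j hij hj
    omega

lemma pvScanComma_some (chars : List Char) (i k : Nat) :
    pvScanComma chars i = some k →
    i ≤ k ∧ ∃ hk : k + 1 < chars.length, chars[k]'(by omega) = ',' ∧ chars[k + 1] = ' ' ∧
      ∀ j, i ≤ j → j < k → (hj : j + 1 < chars.length) →
        ¬(chars[j]'(by omega) = ',' ∧ chars[j + 1] = ' ') := by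
  fun_induction pvScanComma chars i with
  | case1 i hi hq =>
    intro h
    obtain rfl : i = k := by simpa using h
    exact ⟨le_refl _, hi, hq.1, hq.2, fun j h1 h2 _ => by omega⟩
  | case2 i hi hq ih =>
    intro h
    obtain ⟨hik, hk, hc1, hc2, hmin⟩ := ih h
    refine ⟨by omega, hk, hc1, hc2, ?_⟩
    intro j h1 h2 hj
    rcases Nat.eq_or_lt_of_le h1 with rfl | hlt
    · exact hq
    · exact hmin j hlt h2 hj
  | case3 i hi => intro h; simp at h

-- ---- loop 1 removes exactly the quotes ----

lemma pvLoop1_eq (fuel : Nat) (chars : List Char) (index : Nat)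
    (hf : ((chars.drop index).count '\'') ≤ fuel) :
    pvLoop1 fuel chars index = chars.take index ++ (chars.drop index).filter (· ≠ '\'') := by
  induction fuel generalizing chars index with
  | zero =>
    have hnone : ∀ c ∈ chars.drop index, ¬(c = '\'') := by
      intro c hc hcq
      subst hcq
      have := List.count_pos_iff.mpr hc
      omega
    rw [pvLoop1, List.filter_eq_self.mpr (by intro c hc; simpa using hnone c hc),
      List.take_append_drop]
  | succ fuel ih =>
    rw [pvLoop1]
    cases hscan : pvScanQuote chars index with
    | none =>
      have hnone : ∀ c ∈ chars.drop index, ¬(c = '\'') := by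
        intro c hc
        obtain ⟨j, hj, hcj⟩ := List.getElem_of_mem hc
        rw [List.getElem_drop] at hcj
        rw [← hcj]
        exact pvScanQuote_none chars index hscan (index + j) (by omega)
          (by have := List.length_drop (l := chars) (i := index) ▸ hj; omega)
      rw [List.filter_eq_self.mpr (by intro c hc; simpa using hnone c hc),
        List.take_append_drop]
    | some i =>
      obtain ⟨hii, hk, hq, hmin⟩ := pvScanQuote_some chars index i hscan
      set m : List Char := (chars.drop index).take (i - index) with hm
      have hmem : ∀ c ∈ m, ¬(c = '\'') := by
        intro c hc hcq
        obtain ⟨j, hj, hcj⟩ := List.getElem_of_mem hc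
        have hjlt : j < i - index := by
          simp only [hm, List.length_take] at hj
          omega
        simp only [hm, List.getElem_take, List.getElem_drop] at hcj
        exact hmin (index + j) (by omega) (by omega) (by omega) (by rw [hcj, hcq])
      have htake : chars.take i = chars.take index ++ m := by
        rw [hm, ← List.take_add]
        congr 1
        omega
      have hdropi : chars.drop index = m ++ chars.drop i := by
        rw [hm]
        conv_lhs => rw [← List.take_append_drop (i - index) (chars.drop index)]
        rw [List.drop_drop]
        congr 2
        omega
      have hdrop1 : chars.drop i = chars[i] :: chars.drop (i + 1) :=
        List.drop_eq_getElem_cons hk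
      have herase : chars.eraseIdx i = chars.take i ++ chars.drop (i + 1) :=
        List.eraseIdx_eq_take_drop_succ chars i
      have hlen : (chars.take i).length = i := by
        simp only [List.length_take]
        omega
      have hetake : (chars.eraseIdx i).take i = chars.take i := by
        rw [herase, List.take_append_of_le_length (by omega)]
        simp
      have hedrop : (chars.eraseIdx i).drop i = chars.drop (i + 1) := by
        rw [herase, List.drop_append_of_le_length (by omega),
          List.drop_eq_nil_of_le (by omega), List.nil_append]
      have hcount : ((chars.eraseIdx i).drop i).count '\'' ≤ fuel := by
        rw [hedrop]
        have h1 : (chars.drop index).count '\'' =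
            m.count '\'' + (chars.drop i).count '\'' := by
          rw [hdropi, List.count_append]
        have h2 : (chars.drop i).count '\'' = (chars.drop (i + 1)).count '\'' + 1 := by
          rw [hdrop1, List.count_cons]
          simp [hq]
        omega
      show pvLoop1 fuel (chars.eraseIdx i) i = _
      rw [ih (chars.eraseIdx i) i hcount, hetake, hedrop, htake, hdropi, hdrop1,
        List.filter_append]
      have hfm : List.filter (fun x => decide (x ≠ '\'')) m = m := by
        rw [List.filter_eq_self]
        intro c hc
        simpa using hmem c hc
      rw [hfm]
      simp [hq]

-- ---- loop 2 computes pvRep ----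

lemma pvLoop2_eq (fuel : Nat) (chars : List Char) (index : Nat)
    (hf : ((chars.drop index).count ',') ≤ fuel) :
    pvLoop2 fuel chars index = chars.take index ++ pvRep (chars.drop index) := by
  induction fuel generalizing chars index with
  | zero =>
    have hnone : (chars.drop index).IsChain pvP := by
      rw [List.isChain_iff_getElem]
      intro j hj
      intro hc
      have hmem : ',' ∈ chars.drop index := by
        rw [← hc.1]; exact List.getElem_mem _
      have := List.count_pos_iff.mpr hmem
      omega
    rw [pvLoop2, pvRep_eq_self _ hnone, List.take_append_drop]
  | succ fuel ih =>
    rw [pvLoop2]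
    cases hscan : pvScanComma chars index with
    | none =>
      have hnone : (chars.drop index).IsChain pvP := by
        rw [List.isChain_iff_getElem]
        intro j hj
        have hlen := List.length_drop (l := chars) (i := index)
        have hj' : index + j + 1 < chars.length := by omega
        have h := pvScanComma_none chars index hscan (index + j) (by omega) hj'
        simp only [List.getElem_drop]
        intro hc
        exact h ⟨hc.1, hc.2⟩
      rw [pvRep_eq_self _ hnone, List.take_append_drop]
    | some i =>
      obtain ⟨hii, hk, hc1, hc2, hmin⟩ := pvScanComma_some chars index i hscan
      set m : List Char := (chars.drop index).take (i - index) with hm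
      have hmchain : m.IsChain pvP := by
        rw [List.isChain_iff_getElem]
        intro j hj
        have hmlen : m.length ≤ i - index := by
          rw [hm]
          simp only [List.length_take]
          omega
        have hj' : index + j + 1 < chars.length := by omega
        have h := hmin (index + j) (by omega) (by omega) hj'
        simp only [hm, List.getElem_take, List.getElem_drop]
        intro hc
        exact h ⟨hc.1, hc.2⟩
      have htake : chars.take i = chars.take index ++ m := by
        rw [hm, ← List.take_add]
        congr 1
        omega
      have hdropi : chars.drop index = m ++ chars.drop i := by
        rw [hm]
        conv_lhs => rw [← List.take_append_drop (i - index) (chars.drop index)]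
        rw [List.drop_drop]
        congr 2
        omega
      have hdrop1 : chars.drop i = chars[i]'(by omega) :: chars.drop (i + 1) :=
        List.drop_eq_getElem_cons (by omega)
      have hdrop2 : chars.drop (i + 1) = chars[i + 1] :: chars.drop (i + 2) :=
        List.drop_eq_getElem_cons hk
      have herase : chars.eraseIdx i = chars.take i ++ chars.drop (i + 1) :=
        List.eraseIdx_eq_take_drop_succ chars i
      have hlen : (chars.take i).length = i := by
        simp only [List.length_take]
        omega
      have hetake : (chars.eraseIdx i).take i = chars.take i := by
        rw [herase, List.take_append_of_le_length (by omega)]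
        simp
      have hedrop : (chars.eraseIdx i).drop i = chars.drop (i + 1) := by
        rw [herase, List.drop_append_of_le_length (by omega),
          List.drop_eq_nil_of_le (by omega), List.nil_append]
      have hcount : ((chars.eraseIdx i).drop i).count ',' ≤ fuel := by
        rw [hedrop]
        have h1 : (chars.drop index).count ',' =
            m.count ',' + (chars.drop i).count ',' := by
          rw [hdropi, List.count_append]
        have h2 : (chars.drop i).count ',' = (chars.drop (i + 1)).count ',' + 1 := by
          rw [hdrop1, List.count_cons]
          simp [hc1]
        omega
      show pvLoop2 fuel (chars.eraseIdx i) i = _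
      rw [ih (chars.eraseIdx i) i hcount, hetake, hedrop, htake, hdropi, hdrop1, hdrop2,
        hc1, hc2]
      rw [pvRep_append m (',' :: ' ' :: chars.drop (i + 2)) hmchain (by simp)]
      rw [pvRep_cons ' ' (chars.drop (i + 2))
        (by intro b _; intro hc; exact absurd hc.1 (by decide))]
      simp [pvRep]

-- ---- PySem.Chars.replace computes filter / pvRep ----

lemma replace_go_quote (fuel : Nat) (l acc : List Char) (h : l.length ≤ fuel) :
    PySem.Chars.replace.go ['\''] [] fuel l acc = acc.reverse ++ l.filter (· ≠ '\'') := by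
  induction fuel generalizing l acc with
  | zero =>
    interval_cases hl : l.length
    · rw [List.length_eq_zero_iff.mp hl]
      simp [PySem.Chars.replace.go]
  | succ fuel ih =>
    cases l with
    | nil => simp [PySem.Chars.replace.go]
    | cons c t =>
      by_cases hc : c = '\''
      · subst hc
        have hpre : List.isPrefixOf ['\''] ('\'' :: t) = true := by
          simp [List.isPrefixOf]
        rw [PySem.Chars.replace.go, if_pos hpre]
        simp only [List.length_cons, List.length_nil, List.drop_succ_cons, List.drop_zero,
          List.reverse_nil, List.nil_append]
        rw [ih t acc (by simp at h; omega)]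
        simp
      · have hpre : List.isPrefixOf ['\''] (c :: t) = false := by
          simp only [List.isPrefixOf, Bool.and_true, beq_eq_false_iff_ne,
            ne_eq]
          exact fun hq => hc hq.symm
        rw [PySem.Chars.replace.go, if_neg (by simp [hpre])]
        rw [ih t (c :: acc) (by simp at h; omega)]
        simp [hc]

lemma replace_go_comma (fuel : Nat) (l acc : List Char) (h : l.length ≤ fuel) :
    PySem.Chars.replace.go [',', ' '] [' '] fuel l acc = acc.reverse ++ pvRep l := by
  induction fuel generalizing l acc with
  | zero =>
    interval_cases hl : l.length
    · rw [List.length_eq_zero_iff.mp hl]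
      simp [PySem.Chars.replace.go, pvRep]
  | succ fuel ih =>
    cases l with
    | nil => simp [PySem.Chars.replace.go, pvRep]
    | cons c t =>
      cases hpre : List.isPrefixOf [',', ' '] (c :: t) with
      | true =>
        obtain ⟨rfl, t', rfl⟩ : c = ',' ∧ ∃ t', t = ' ' :: t' := by
          cases t with
          | nil => simp [List.isPrefixOf] at hpre
          | cons d t' =>
            simp only [List.isPrefixOf, Bool.and_eq_true, beq_iff_eq] at hpre
            exact ⟨hpre.1.symm, t', by rw [← hpre.2.1]⟩
        rw [PySem.Chars.replace.go, if_pos hpre]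
        simp only [List.length_cons, List.length_nil, List.drop_succ_cons, List.drop_zero]
        rw [ih t' ([' '].reverse ++ acc) (by simp at h ⊢; omega)]
        simp [pvRep]
      | false =>
        rw [PySem.Chars.replace.go, if_neg (by simp [hpre])]
        rw [ih t (c :: acc) (by simp at h; omega)]
        have hrep : pvRep (c :: t) = c :: pvRep t := by
          cases t with
          | nil => simp [pvRep]
          | cons d t' =>
            have : ¬(c = ',' ∧ d = ' ') := by
              intro hc
              rw [hc.1, hc.2] at hpre
              simp [List.isPrefixOf] at hpre
            simp [pvRep, this]
        rw [hrep]
        simp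

lemma replace_quote (l : List Char) :
    PySem.Chars.replace l ['\''] [] = l.filter (· ≠ '\'') := by
  rw [PySem.Chars.replace, if_neg (by simp)]
  simpa using replace_go_quote l.length l [] (le_refl _)

lemma replace_comma (l : List Char) :
    PySem.Chars.replace l [',', ' '] [' '] = pvRep l := by
  rw [PySem.Chars.replace, if_neg (by simp)]
  simpa using replace_go_comma l.length l [] (le_refl _)

-- ===== VERDICT (by name: the statement is the Claim_ definition above) =====
theorem remove_quotes_comma_spec : Claim_equal_remove_quotes_comma := by
  intro s _
  unfold Spec_remove_quotes_comma remove_quotes_comma remove_quotes_comma_alt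
  apply String.toList_inj.mp
  have h1 : pvLoop1 s.toList.length s.toList 0
      = s.toList.filter (· ≠ '\'') := by
    simpa using pvLoop1_eq s.toList.length s.toList 0 (by simpa using List.count_le_length)
  set cs1 := s.toList.filter (· ≠ '\'') with hcs1
  have h2 : pvLoop2 cs1.length cs1 0 = pvRep cs1 := by
    simpa using pvLoop2_eq cs1.length cs1 0 (by simpa using List.count_le_length)
  have hB : (PySem.Str.replace (PySem.Str.replace s "'" "") ", " " ").toList
      = pvRep cs1 := by
    rw [PySem.Str.toList_replace, PySem.Str.toList_replace]
    have ho : ("'" : String).toList = ['\''] := by decide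
    have hn : ("" : String).toList = [] := by decide
    have ho2 : (", " : String).toList = [',', ' '] := by decide
    have hn2 : (" " : String).toList = [' '] := by decide
    rw [ho, hn, ho2, hn2, replace_quote, replace_comma]
  simp only [hB, String.toList_ofList, h1, h2]
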